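-- pv_equiv track=rewrite | github.com/daniel-reich/ubiquitous-fiesta | iuenzEsAejQ4ZPqzJ_24.py | mystery_func
-- ===== SOURCE A (Python) =====
-- def mystery_func(num):
--   p = num
--   c = 0
--   while p >= 2:
--     p = p // 2
--     c += 1
--   r = num % (2**c)
--   return int("2"*c + str(r))
-- ===== SOURCE B (Python) =====
-- def mystery_func(num):
--   if num < 2:
--     return 0
--   c = num.bit_length() - 1
--   r = num % (2**c)
--   return int("2"*c + str(r))
-- ===== Notes on version B (the rewrite author's own statement) =====
-- stated objective: idiomatic
-- what changed: B replaces A's halving while-loop that counts divisions with a direct bit_length() query (c = num.bit_length() - 1) and returns 0 immediately for num < 2; the final string-building step is kept identical.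
import Mathlib
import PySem

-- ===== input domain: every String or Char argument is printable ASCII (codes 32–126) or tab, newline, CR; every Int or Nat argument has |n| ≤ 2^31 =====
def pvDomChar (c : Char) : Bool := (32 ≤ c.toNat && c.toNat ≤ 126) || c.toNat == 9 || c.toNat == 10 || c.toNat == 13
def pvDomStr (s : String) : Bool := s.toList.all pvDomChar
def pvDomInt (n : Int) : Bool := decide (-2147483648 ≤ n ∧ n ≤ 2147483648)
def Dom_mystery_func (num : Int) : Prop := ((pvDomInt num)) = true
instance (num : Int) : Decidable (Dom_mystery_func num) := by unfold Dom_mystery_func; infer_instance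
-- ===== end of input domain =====

-- B changes A's halving while-loop into a direct bit_length query (same exact result; not measured faster).

-- shared final line of BOTH Pythons: int("2"*c + str(r));  int() cannot raise here since
-- r = num % 2**c is always ≥ 0, so the argument is a nonempty digit string
def mfFinal (c : Nat) (r : Int) : Int :=
  (PySem.Int.ofChars? (List.replicate c '2' ++ PySem.Int.toChars r)).getD 0

-- ===== PORT A =====
-- the while-loop: p halves while p >= 2, c counts the iterations (c only ever increments from 0, so Nat)
def mfLoop (p : Int) (c : Nat) : Nat :=
  if 2 ≤ p then mfLoop (PySem.Int.floordiv p 2) (c + 1) else c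
termination_by p.toNat
decreasing_by
  rw [PySem.Int.floordiv_eq_ediv_of_pos (by omega)]
  omega

def mystery_func (num : Int) : Int :=
  let c := mfLoop num 0
  let r := PySem.Int.mod num (2 ^ c)
  mfFinal c r

-- ===== PORT B =====
def mystery_func_alt (num : Int) : Int :=
  if num < 2 then 0
  else
    let c := PySem.Int.bitLength num - 1   -- num.bit_length() - 1
    let r := PySem.Int.mod num (2 ^ c)
    mfFinal c r

-- ===== PRECONDITION & SPEC =====
def Spec_mystery_func (num : Int) (out : Int) : Prop := out = mystery_func_alt num
instance (num : Int) (out : Int) : Decidable (Spec_mystery_func num out) := by unfold Spec_mystery_func; infer_instance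

-- ===== CLAIM (what is proved, stated in full; the proofs are below) =====
def Claim_equal_mystery_func : Prop := ∀ (num : Int), Dom_mystery_func num → Spec_mystery_func num (mystery_func num)

-- ===== LEMMAS AND PROOFS =====

-- A's loop counts exactly bit_length - 1 halvings on positive input
theorem mfLoop_eq (p : Int) (c : Nat) (hp : 0 < p) :
    mfLoop p c + 1 = c + PySem.Int.bitLength p := by
  rw [mfLoop]
  by_cases h : 2 ≤ p
  · simp only [if_pos h]
    have hp2 : 0 < PySem.Int.floordiv p 2 := by
      rw [PySem.Int.floordiv_eq_ediv_of_pos (by omega)]; omega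
    rw [mfLoop_eq _ _ hp2, PySem.Int.bitLength_of_pos hp]
    omega
  · simp only [if_neg h]
    -- here p = 1, whose bit length is 1
    have : p = 1 := by omega
    rw [this]
    have h1 : PySem.Int.bitLength 1 = 1 := by decide
    omega
termination_by p.toNat
decreasing_by
  rw [PySem.Int.floordiv_eq_ediv_of_pos (by omega)]
  omega

-- ===== VERDICT (by name: the statement is the Claim_ definition above) =====
theorem mystery_func_spec : Claim_equal_mystery_func := by
  intro num _
  unfold Spec_mystery_func mystery_func mystery_func_alt
  by_cases h : num < 2
  · -- loop does not run: c = 0, r = num % 1 = 0, int("0") = 0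
    rw [if_pos h, mfLoop, if_neg (by omega)]
    have : PySem.Int.mod num (2 ^ 0) = 0 := by
      rw [PySem.Int.mod_eq_emod_of_pos (by norm_num)]
      simp
    simp only [this, mfFinal]
    decide
  · rw [if_neg h]
    have := mfLoop_eq num 0 (by omega)
    have hc : mfLoop num 0 = PySem.Int.bitLength num - 1 := by omega
    simp only [hc]
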